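-- pv_equiv track=rewrite | github.com/lesserkuma/FlashGBX | FlashGBX/Util.py | ConvertMapperToMapperType
-- ===== SOURCE A (Python) =====
-- DMG_Mapper_Types = { "None":[ 0x00, 0x08, 0x09 ], "MBC1":[ 0x01, 0x02, 0x03 ], "MBC2":[ 0x05, 0x06 ], "MBC3":[ 0x0F, 0x10, 0x11, 0x12, 0x13 ], "MBC30":[ 0x110 ], "MBC5":[ 0x19, 0x1A, 0x1B, 0x1C, 0x1D, 0x1E ], "MBC6":[ 0x20 ], "MBC7":[ 0x22 ], "MBC1M":[ 0x101, 0x103 ], "MMM01":[ 0x0B, 0x0D ], "MAC-GBD":[ 0xFC ], "G-MMC1":[ 0x105 ], "M161":[ 0x104 ], "HuC-1":[ 0xFF ], "HuC-3":[ 0xFE ], "TAMA5":[ 0xFD ], "Unlicensed 256M Multi Cart Mapper":[ 0x201 ], "Unlicensed Wisdom Tree Mapper":[ 0x202 ], "Unlicensed Xploder GB Mapper":[ 0x203 ], "Unlicensed Sachen Mapper":[ 0x204 ], "Unlicensed Datel Orbit V2 Mapper":[ 0x205 ] }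
--
-- def ConvertMapperToMapperType(mapper_raw):
-- 	i = 0
-- 	for (k, v) in DMG_Mapper_Types.items():
-- 		if i == 0:
-- 			retval = (k, v, i)
-- 		if mapper_raw in v:
-- 			retval = (k, v, i)
-- 			break
-- 		i += 1
-- 	# (string, list of ids, index in DMG_Mapper_Types)
-- 	return retval
-- ===== SOURCE B (Python) =====
-- DMG_Mapper_Types = { "None":[ 0x00, 0x08, 0x09 ], "MBC1":[ 0x01, 0x02, 0x03 ], "MBC2":[ 0x05, 0x06 ], "MBC3":[ 0x0F, 0x10, 0x11, 0x12, 0x13 ], "MBC30":[ 0x110 ], "MBC5":[ 0x19, 0x1A, 0x1B, 0x1C, 0x1D, 0x1E ], "MBC6":[ 0x20 ], "MBC7":[ 0x22 ], "MBC1M":[ 0x101, 0x103 ], "MMM01":[ 0x0B, 0x0D ], "MAC-GBD":[ 0xFC ], "G-MMC1":[ 0x105 ], "M161":[ 0x104 ], "HuC-1":[ 0xFF ], "HuC-3":[ 0xFE ], "TAMA5":[ 0xFD ], "Unlicensed 256M Multi Cart Mapper":[ 0x201 ], "Unlicensed Wisdom Tree Mapper":[ 0x202 ], "Unlicensed Xploder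 GB Mapper":[ 0x203 ], "Unlicensed Sachen Mapper":[ 0x204 ], "Unlicensed Datel Orbit V2 Mapper":[ 0x205 ] }
--
-- # reverse-lookup table built once: mapper id -> (name, id list, index)
-- _REVERSE = {mid: (k, v, i) for i, (k, v) in enumerate(DMG_Mapper_Types.items()) for mid in v}
-- _FIRST_K, _FIRST_V = next(iter(DMG_Mapper_Types.items()))
-- _DEFAULT = (_FIRST_K, _FIRST_V, 0)
--
-- def ConvertMapperToMapperType(mapper_raw):
-- 	return _REVERSE.get(mapper_raw, _DEFAULT)
-- ===== Notes on version B (the rewrite author's own statement) =====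
-- stated objective: faster
-- what changed: Replaces the linear scan over DMG_Mapper_Types (with break and the i==0 default assignment) by a reverse-lookup dict from mapper id to (name, list, index) built once at module load, so the function body is a single dict .get with the first entry as default.
import Mathlib
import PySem

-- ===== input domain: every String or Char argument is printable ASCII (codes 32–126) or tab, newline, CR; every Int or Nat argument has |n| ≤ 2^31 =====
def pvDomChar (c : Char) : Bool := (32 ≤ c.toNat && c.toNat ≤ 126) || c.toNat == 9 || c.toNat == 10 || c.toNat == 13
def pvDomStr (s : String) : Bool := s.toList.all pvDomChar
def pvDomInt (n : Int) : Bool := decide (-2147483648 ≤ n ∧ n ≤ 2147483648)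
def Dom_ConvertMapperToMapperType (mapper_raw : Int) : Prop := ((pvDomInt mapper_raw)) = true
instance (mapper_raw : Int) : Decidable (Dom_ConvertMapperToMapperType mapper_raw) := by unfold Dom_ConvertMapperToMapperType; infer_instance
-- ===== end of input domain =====

-- B replaces A's per-call linear scan by a reverse-lookup table built once (objective: faster, constant-factor).

-- the shared module constant DMG_Mapper_Types (dict -> association list in insertion order)
def DMG_Mapper_Types : List (String × List Int) :=
  [ ("None", [0x00, 0x08, 0x09]), ("MBC1", [0x01, 0x02, 0x03]), ("MBC2", [0x05, 0x06]),
    ("MBC3", [0x0F, 0x10, 0x11, 0x12, 0x13]), ("MBC30", [0x110]),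
    ("MBC5", [0x19, 0x1A, 0x1B, 0x1C, 0x1D, 0x1E]), ("MBC6", [0x20]), ("MBC7", [0x22]),
    ("MBC1M", [0x101, 0x103]), ("MMM01", [0x0B, 0x0D]), ("MAC-GBD", [0xFC]),
    ("G-MMC1", [0x105]), ("M161", [0x104]), ("HuC-1", [0xFF]), ("HuC-3", [0xFE]),
    ("TAMA5", [0xFD]), ("Unlicensed 256M Multi Cart Mapper", [0x201]),
    ("Unlicensed Wisdom Tree Mapper", [0x202]), ("Unlicensed Xploder GB Mapper", [0x203]),
    ("Unlicensed Sachen Mapper", [0x204]), ("Unlicensed Datel Orbit V2 Mapper", [0x205]) ]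

-- ===== PORT A =====
-- A's for-loop with break: step over the remaining items carrying i and retval
def pvScanA (mapper_raw : Int) : List (String × List Int) → Int → (String × List Int × Int) → String × List Int × Int
  | [], _, retval => retval
  | (k, v) :: rest, i, retval =>
      let retval := if i == 0 then (k, v, i) else retval
      if v.contains mapper_raw then (k, v, i)      -- retval = (k,v,i); break
      else pvScanA mapper_raw rest (i + 1) retval  -- i += 1

def ConvertMapperToMapperType (mapper_raw : Int) : String × List Int × Int :=
  pvScanA mapper_raw DMG_Mapper_Types 0 ("", [], 0)  -- retval unbound before the loop; table is nonempty so it is always set at i = 0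

-- ===== PORT B =====
-- reverse-lookup table built once: mapper id -> (name, id list, index)
def pvReverse : List (Int × (String × List Int × Int)) :=
  (PySem.List.enumerate DMG_Mapper_Types).flatMap
    (fun p => p.2.2.map (fun mid => (mid, (p.2.1, p.2.2, p.1))))

def pvDefault : String × List Int × Int :=
  match DMG_Mapper_Types with
  | (k, v) :: _ => (k, v, 0)
  | [] => ("", [], 0)

def ConvertMapperToMapperType_alt (mapper_raw : Int) : String × List Int × Int :=
  ((pvReverse.lookup mapper_raw).getD pvDefault)

-- ===== PRECONDITION & SPEC =====
def Spec_ConvertMapperToMapperType (mapper_raw : Int) (out : String × List Int × Int) : Prop := out = ConvertMapperToMapperType_alt mapper_raw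
instance (mapper_raw : Int) (out : String × List Int × Int) : Decidable (Spec_ConvertMapperToMapperType mapper_raw out) := by unfold Spec_ConvertMapperToMapperType; infer_instance

-- ===== CLAIM (what is proved, stated in full; the proofs are below) =====
def Claim_equal_ConvertMapperToMapperType : Prop := ∀ (mapper_raw : Int), Dom_ConvertMapperToMapperType mapper_raw → Spec_ConvertMapperToMapperType mapper_raw (ConvertMapperToMapperType mapper_raw)

-- ===== LEMMAS AND PROOFS =====

-- the reverse table of a suffix of the dict, starting at index i
def pvFlatFrom : List (String × List Int) → Int → List (Int × (String × List Int × Int))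
  | [], _ => []
  | (k, v) :: rest, i => v.map (fun mid => (mid, (k, v, i))) ++ pvFlatFrom rest (i + 1)

theorem lookup_map_const (m : Int) (v : List Int) (x : String × List Int × Int) :
    (v.map (fun mid => (mid, x))).lookup m = if m ∈ v then some x else none := by
  induction v with
  | nil => simp
  | cons a t ih =>
      by_cases h : m = a
      · subst h; simp
      · have hb : (m == a) = false := by simpa using h
        simp [List.lookup, hb, ih, h]

theorem lookup_append {α β : Type} [BEq α] (l₁ l₂ : List (α × β)) (a : α) :
    (l₁ ++ l₂).lookup a = ((l₁.lookup a).or (l₂.lookup a)) := by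
  induction l₁ with
  | nil => simp
  | cons p t ih =>
      cases h : (a == p.1) <;> simp [List.lookup, h, ih]

theorem scan_eq_lookup (m : Int) (l : List (String × List Int)) :
    ∀ (i : Int) (r : String × List Int × Int), 1 ≤ i →
      pvScanA m l i r = ((pvFlatFrom l i).lookup m).getD r := by
  induction l with
  | nil => intro i r _; simp [pvScanA, pvFlatFrom]
  | cons p rest ih =>
      intro i r hi
      obtain ⟨k, v⟩ := p
      have hne : (i == 0) = false := by simp; omega
      simp only [pvScanA, pvFlatFrom, hne, lookup_append, lookup_map_const]
      by_cases hc : m ∈ v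
      · simp [hc]
      · simp [hc, ih (i + 1) r (by omega)]

-- ===== VERDICT (by name: the statement is the Claim_ definition above) =====
theorem ConvertMapperToMapperType_spec : Claim_equal_ConvertMapperToMapperType := by
  intro m _
  unfold Spec_ConvertMapperToMapperType ConvertMapperToMapperType ConvertMapperToMapperType_alt
  have hrev : pvReverse = (([0x00, 0x08, 0x09] : List Int).map
      (fun mid => (mid, ("None", [0x00, 0x08, 0x09], (0 : Int))))) ++ pvFlatFrom DMG_Mapper_Types.tail 1 := by
    rfl
  have hdef : pvDefault = ("None", [0x00, 0x08, 0x09], (0 : Int)) := rfl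
  have hstep : pvScanA m DMG_Mapper_Types 0 ("", [], 0) =
      if ([0x00, 0x08, 0x09] : List Int).contains m then ("None", [0x00, 0x08, 0x09], (0 : Int))
      else pvScanA m DMG_Mapper_Types.tail 1 ("None", [0x00, 0x08, 0x09], (0 : Int)) := by
    show (if ([0x00, 0x08, 0x09] : List Int).contains m then _ else pvScanA m DMG_Mapper_Types.tail (0 + 1) _) = _
    norm_num
  rw [hstep, hrev, lookup_append, lookup_map_const, hdef]
  by_cases hc : m ∈ ([0x00, 0x08, 0x09] : List Int)
  · simp [hc]
  · simp only [hc, if_neg, not_false_iff, Option.none_or]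
    rw [scan_eq_lookup m _ 1 _ (by omega)]
    simp [hc]
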